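-- pv_equiv track=rewrite | github.com/devanshu0602/Assignments | Operating Systems/Preemptive_Priority.py | find_highest_priority
-- ===== SOURCE A (Python) =====
-- def find_highest_priority(processes, arrival_times, burst_times, priorities, current_time):
--     highest_priority = float('inf')
--     highest_priority_index = -1
--     for i in range(len(processes)):
--         if arrival_times[i] <= current_time and priorities[i] < highest_priority and burst_times[i] > 0:
--             highest_priority = priorities[i]
--             highest_priority_index = i
--     return highest_priority_index
-- ===== SOURCE B (Python) =====
-- def find_highest_priority(processes, arrival_times, burst_times, priorities, current_time):
--     # Stable sort of indices by priority; the first eligible index in that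
--     # order is the eligible index with minimal priority, earliest on ties.
--     for i in sorted(range(len(processes)), key=lambda i: priorities[i]):
--         if arrival_times[i] <= current_time and burst_times[i] > 0:
--             return i
--     return -1
-- ===== Notes on version B (the rewrite author's own statement) =====
-- stated objective: alternative
-- what changed: replaces A's fused argmin scan carrying (best_priority, best_index) state seeded with float('inf') by a sort-then-scan: stable-sort the indices by priority and return the first eligible one (stability reproduces A's strict-< first-wins tie-breaking)
-- outside the precondition, e.g. on find_highest_priority([0, 0], [5, 5], [], [], 1): A returns -1, B raises IndexError
import Mathlib
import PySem

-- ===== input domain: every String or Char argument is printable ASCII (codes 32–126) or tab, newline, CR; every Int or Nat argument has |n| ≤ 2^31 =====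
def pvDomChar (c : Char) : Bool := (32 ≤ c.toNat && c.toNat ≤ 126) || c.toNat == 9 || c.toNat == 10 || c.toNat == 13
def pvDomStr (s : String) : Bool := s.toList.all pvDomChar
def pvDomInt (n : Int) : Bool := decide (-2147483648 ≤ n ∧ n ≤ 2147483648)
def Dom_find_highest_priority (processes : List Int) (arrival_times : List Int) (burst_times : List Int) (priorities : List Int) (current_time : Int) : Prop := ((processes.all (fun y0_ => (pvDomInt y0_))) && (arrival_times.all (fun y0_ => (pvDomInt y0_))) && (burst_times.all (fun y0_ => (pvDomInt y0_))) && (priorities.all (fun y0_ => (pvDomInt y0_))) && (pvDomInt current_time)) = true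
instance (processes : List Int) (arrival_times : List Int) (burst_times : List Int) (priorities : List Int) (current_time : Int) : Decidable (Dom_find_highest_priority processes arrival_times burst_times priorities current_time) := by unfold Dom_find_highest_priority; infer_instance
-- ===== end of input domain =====

-- B replaces A's fused argmin scan (best-priority/best-index state seeded with float('inf'))
-- by a sort-then-scan: stable-sort the indices by priority, return the first eligible one
-- (objective: alternative; stability reproduces A's strict-< first-wins tie-breaking).

-- ===== PORT A =====
-- A's loop body: state = (highest_priority, highest_priority_index); float('inf') is the `none` case.
def pvStepA (arr bur pri : List Int) (ct : Int) (st : Option Int × Int) (i : Nat) : Option Int × Int :=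
  if (decide (arr.getD i 0 ≤ ct) &&
      (match st.1 with | none => true | some hp => decide (pri.getD i 0 < hp)) &&
      decide (0 < bur.getD i 0)) then
    (some (pri.getD i 0), (i : Int))
  else st

def find_highest_priority (processes : List Int) (arrival_times : List Int) (burst_times : List Int) (priorities : List Int) (current_time : Int) : Int :=
  ((List.range processes.length).foldl
    (pvStepA arrival_times burst_times priorities current_time) (none, -1)).2

-- ===== PORT B =====
-- B's eligibility test (the loop's `if` condition).
def pvOk (arr bur : List Int) (ct : Int) (i : Nat) : Bool :=
  decide (arr.getD i 0 ≤ ct) && decide (0 < bur.getD i 0)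

-- Source B: for i in sorted(range(n), key=…): if ok(i): return i;  return -1.
-- The early-returning for-loop is List.find? over the sorted index list.
def find_highest_priority_alt (processes : List Int) (arrival_times : List Int) (burst_times : List Int) (priorities : List Int) (current_time : Int) : Int :=
  match (PySem.List.sorted (List.range processes.length)
           (fun i => priorities.getD i 0) false).find?
          (pvOk arrival_times burst_times current_time) with
  | none => -1
  | some i => (i : Int)

-- ===== PRECONDITION & SPEC =====
-- Pre_ requires the three attribute lists to cover every process index; outside it Python
-- raises IndexError (B's sort key reads priorities[i] for every index; A's short-circuit
-- can still return on a few such inputs — those are excluded too, see claim cites).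
def Pre_find_highest_priority (processes : List Int) (arrival_times : List Int) (burst_times : List Int) (priorities : List Int) (current_time : Int) : Prop :=
  processes.length ≤ arrival_times.length ∧ processes.length ≤ burst_times.length ∧ processes.length ≤ priorities.length
instance (processes : List Int) (arrival_times : List Int) (burst_times : List Int) (priorities : List Int) (current_time : Int) : Decidable (Pre_find_highest_priority processes arrival_times burst_times priorities current_time) := by unfold Pre_find_highest_priority; infer_instance

def pvWitness_find_highest_priority : List Int × List Int × List Int × List Int × Int :=
  ([1, 2], [0, 0], [3, 4], [2, 1], 0)

def Spec_find_highest_priority (processes : List Int) (arrival_times : List Int) (burst_times : List Int) (priorities : List Int) (current_time : Int) (out : Int) : Prop := out = find_highest_priority_alt processes arrival_times burst_times priorities current_time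
instance (processes : List Int) (arrival_times : List Int) (burst_times : List Int) (priorities : List Int) (current_time : Int) (out : Int) : Decidable (Spec_find_highest_priority processes arrival_times burst_times priorities current_time out) := by unfold Spec_find_highest_priority; infer_instance

-- ===== CLAIM (what is proved, stated in full; the proofs are below) =====
def Claim_equal_find_highest_priority : Prop := ∀ (processes : List Int) (arrival_times : List Int) (burst_times : List Int) (priorities : List Int) (current_time : Int), Dom_find_highest_priority processes arrival_times burst_times priorities current_time → Pre_find_highest_priority processes arrival_times burst_times priorities current_time → Spec_find_highest_priority processes arrival_times burst_times priorities current_time (find_highest_priority processes arrival_times burst_times priorities current_time)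

-- ===== LEMMAS AND PROOFS =====

-- First-wins argmin over a nonempty index list (the common middle form both sides reach).
def pvMinBy (pri : List Int) (e : Nat) (es : List Nat) : Nat :=
  es.foldl (fun b i => if pri.getD i 0 < pri.getD b 0 then i else b) e

-- A's fold over range n = none/-1 if no index is eligible, else the first-wins argmin
-- (with its priority) over the eligible indices.
theorem pvMain (arr bur pri : List Int) (ct : Int) (n : Nat) :
    (List.range n).foldl (pvStepA arr bur pri ct) (none, -1) =
      match (List.range n).filter (pvOk arr bur ct) with
      | [] => (none, -1)
      | e :: es => (some (pri.getD (pvMinBy pri e es) 0), ((pvMinBy pri e es : Nat) : Int)) := by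
  induction n with
  | zero => simp
  | succ n ih =>
    rw [List.range_succ, List.foldl_append, List.filter_append, ih]
    have hfilt : List.filter (pvOk arr bur ct) [n] = if pvOk arr bur ct n = true then [n] else [] := by
      cases hc : pvOk arr bur ct n <;> simp [List.filter, hc]
    cases h : (List.range n).filter (pvOk arr bur ct) with
    | nil =>
      by_cases hok : pvOk arr bur ct n = true
      · rcases (by simpa [pvOk] using hok : _ ∧ _) with ⟨ha, hb⟩
        simp [hfilt, hok, pvStepA, pvMinBy, ha, hb]
      · have hok' := hok
        simp only [pvOk, Bool.and_eq_true, decide_eq_true_eq,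
          List.getD_eq_getElem?_getD] at hok'
        simp only [hfilt, if_neg hok, List.append_nil, List.foldl_cons, List.foldl_nil]
        simp [pvStepA]
        intro h1
        by_contra hb'
        exact hok' ⟨h1, lt_of_not_ge hb'⟩
    | cons e es =>
      have hmin : pvMinBy pri e (es ++ [n]) =
          (if pri.getD n 0 < pri.getD (pvMinBy pri e es) 0 then n else pvMinBy pri e es) := by
        unfold pvMinBy; rw [List.foldl_append]; rfl
      by_cases hok : pvOk arr bur ct n = true
      · rcases (by simpa [pvOk] using hok : _ ∧ _) with ⟨ha, hb⟩
        simp only [hfilt, if_pos hok, List.foldl_cons, List.foldl_nil]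
        simp [pvStepA, ha, hb]
        split_ifs <;> simp_all
      · have hok' := hok
        simp only [pvOk, Bool.and_eq_true, decide_eq_true_eq,
          List.getD_eq_getElem?_getD] at hok'
        simp only [hfilt, if_neg hok, List.append_nil, List.foldl_cons, List.foldl_nil]
        simp [pvStepA]
        intro h1 h2 h3
        exact absurd ⟨h1, h3⟩ hok'

-- If x's key is strictly below every element's key, insertBy puts it at the front.
theorem pvInsertFront (key : Nat → Int) (x : Nat) (zs : List Nat)
    (h : ∀ z ∈ zs, key x < key z) :
    PySem.List.insertBy (fun a b => decide (key a < key b)) x zs = x :: zs := by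
  cases zs with
  | nil => rfl
  | cons z zs => simp [PySem.List.insertBy, h z (List.mem_cons_self ..)]

-- Filtering commutes with insertBy into a key-sorted list.
theorem pvFilterInsertBy (key : Nat → Int) (p : Nat → Bool) (x : Nat) (zs : List Nat)
    (h : zs.Pairwise (fun a b => key a ≤ key b)) :
    (PySem.List.insertBy (fun a b => decide (key a < key b)) x zs).filter p =
      if p x then PySem.List.insertBy (fun a b => decide (key a < key b)) x (zs.filter p)
      else zs.filter p := by
  induction zs with
  | nil => cases hx : p x <;> simp [PySem.List.insertBy, hx]
  | cons z zs ih =>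
    rcases List.pairwise_cons.mp h with ⟨h1, h2⟩
    by_cases hxz : key x < key z
    · have hfront : PySem.List.insertBy (fun a b => decide (key a < key b)) x
          ((z :: zs).filter p) = x :: (z :: zs).filter p := by
        apply pvInsertFront
        intro w hw
        rcases List.mem_cons.mp (List.mem_of_mem_filter hw) with rfl | hw'
        · exact hxz
        · exact lt_of_lt_of_le hxz (h1 w hw')
      cases hx : p x <;> simp [PySem.List.insertBy, hxz, hfront, hx]
    · have hrec := ih h2
      cases hx : p x
      · cases hz : p z <;>
          simp [PySem.List.insertBy, hxz, hz, hrec, hx]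
      · cases hz : p z <;>
          simp [PySem.List.insertBy, hxz, hz, hrec, hx]

-- sorted (l ++ [x]) = insert x into sorted l (read off the insertion-sort characterisation).
theorem pvSortedSnoc (key : Nat → Int) (l : List Nat) (x : Nat) :
    PySem.List.sorted (l ++ [x]) key false =
      PySem.List.insertBy (fun a b => decide (key a < key b)) x (PySem.List.sorted l key false) := by
  rw [PySem.List.sorted_eq_foldl_insertBy, PySem.List.sorted_eq_foldl_insertBy, List.foldl_append]
  rfl

-- Filtering commutes with the stable sort.
theorem pvFilterSorted (key : Nat → Int) (p : Nat → Bool) (xs : List Nat) :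
    (PySem.List.sorted xs key false).filter p = PySem.List.sorted (xs.filter p) key false := by
  induction xs using List.reverseRecOn with
  | nil => rfl
  | append_singleton ys x ih =>
    rw [pvSortedSnoc, pvFilterInsertBy key p x _ (PySem.List.sorted_pairwise ys key),
        List.filter_append, ih]
    cases hx : p x
    · simp [hx]
    · simp [hx, pvSortedSnoc]

-- The head of the stable sort is the first-wins argmin.
theorem pvHeadSorted (pri : List Int) (xs : List Nat) :
    (PySem.List.sorted xs (fun i => pri.getD i 0) false).head? =
      match xs with | [] => none | e :: es => some (pvMinBy pri e es) := by
  induction xs using List.reverseRecOn with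
  | nil => rfl
  | append_singleton ys x ih =>
    rw [pvSortedSnoc]
    cases ys with
    | nil => rfl
    | cons e es =>
      obtain ⟨t, ht⟩ : ∃ t, PySem.List.sorted (e :: es) (fun i => pri.getD i 0) false =
          pvMinBy pri e es :: t := by
        cases hs : PySem.List.sorted (e :: es) (fun i => pri.getD i 0) false with
        | nil => rw [hs] at ih; simp at ih
        | cons m t =>
          rw [hs] at ih; simp at ih
          exact ⟨t, by rw [ih]⟩
      rw [ht]
      have hmin : pvMinBy pri e (es ++ [x]) =
          (if pri.getD x 0 < pri.getD (pvMinBy pri e es) 0 then x else pvMinBy pri e es) := by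
        unfold pvMinBy; rw [List.foldl_append]; rfl
      simp [PySem.List.insertBy, hmin, List.getD_eq_getElem?_getD]
      split_ifs <;> simp

-- ===== VERDICT (by name: the statement is the Claim_ definition above) =====
theorem find_highest_priority_spec : Claim_equal_find_highest_priority := by
  intro processes arrival_times burst_times priorities current_time _ _
  unfold Spec_find_highest_priority find_highest_priority find_highest_priority_alt
  rw [pvMain, ← List.head?_filter,
      pvFilterSorted (fun i => priorities.getD i 0) (pvOk arrival_times burst_times current_time),
      pvHeadSorted]
  cases (List.range processes.length).filter (pvOk arrival_times burst_times current_time) <;> rfl
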